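-- pv_equiv track=rewrite | github.com/kaushalaneesha/juggling-code | InterviewQuestions/Meta/python_interview3.py | find_followers
-- ===== SOURCE A (Python) =====
-- import collections
-- from typing import List
--
-- def find_followers(input: List[List[chr]]) -> dict:
--     followers = collections.defaultdict(int)
--     for elem in input:
--         if len(elem) > 1:
--             followers[elem[0]] += 1
--         elif elem[0] not in followers:
--             followers[elem[0]] = 0
--     return followers
-- ===== SOURCE B (Python) =====
-- import collections
--
-- def find_followers(input):
--     counts = collections.Counter(e[0] for e in input if len(e) > 1)
--     result = collections.defaultdict(int)
--     for e in input:
--         result[e[0]] = counts[e[0]]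
--     return result
-- ===== Notes on version B (the rewrite author's own statement) =====
-- stated objective: alternative
-- what changed: A's single branching incremental scan (increment on len>1, conditional zero-insert otherwise) is replaced by building a Counter over first elements of len>1 sublists in one pass and then a second uniform pass assigning result[e[0]] = counts[e[0]] for every sublist.
import Mathlib
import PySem

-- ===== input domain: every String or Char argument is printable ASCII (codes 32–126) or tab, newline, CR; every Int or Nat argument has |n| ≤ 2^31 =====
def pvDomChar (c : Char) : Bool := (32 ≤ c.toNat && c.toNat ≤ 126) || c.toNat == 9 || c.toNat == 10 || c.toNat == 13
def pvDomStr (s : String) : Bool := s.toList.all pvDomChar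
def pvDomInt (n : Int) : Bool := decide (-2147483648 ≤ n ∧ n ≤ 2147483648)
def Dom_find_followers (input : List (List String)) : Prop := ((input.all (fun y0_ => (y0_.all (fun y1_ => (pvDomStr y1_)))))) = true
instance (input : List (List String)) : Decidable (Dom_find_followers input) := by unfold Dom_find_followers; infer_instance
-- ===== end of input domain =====

-- B replaces A's branching incremental scan with a Counter built in one pass plus a
-- uniform assignment pass over all sublists (objective: alternative decomposition, same cost).


-- e[0]: exact on Pre_ (every sublist nonempty; Python raises IndexError on [])
def pvHead (e : List String) : String := e.headD ""

-- ===== PORT A =====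
-- A's loop body: if len(elem) > 1: followers[elem[0]] += 1
--                elif elem[0] not in followers: followers[elem[0]] = 0
def pvStepA (d : PySem.Dict String Int) (elem : List String) : PySem.Dict String Int :=
  if 1 < elem.length then d.modify (pvHead elem) 0 (· + 1)
  else if d.contains (pvHead elem) then d
  else d.insert (pvHead elem) 0

def find_followers (input : List (List String)) : List (String × Int) :=
  (input.foldl pvStepA (PySem.Dict.empty : PySem.Dict String Int)).items

-- ===== PORT B =====
-- counts = Counter(e[0] for e in input if len(e) > 1)
def pvCounts (input : List (List String)) : PySem.Dict String Int :=
  PySem.Dict.counter ((input.filter (fun e => 1 < e.length)).map pvHead)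

-- result = defaultdict(int); for e in input: result[e[0]] = counts[e[0]]
def find_followers_alt (input : List (List String)) : List (String × Int) :=
  (input.foldl
    (fun d e => d.insert (pvHead e) ((pvCounts input).getD (pvHead e) 0))
    (PySem.Dict.empty : PySem.Dict String Int)).items

-- ===== PRECONDITION & SPEC =====
-- Pre_ excludes inputs containing an empty sublist: there e[0] raises IndexError in both A and B.
def Pre_find_followers (input : List (List String)) : Prop := ∀ e ∈ input, e ≠ []
instance (input : List (List String)) : Decidable (Pre_find_followers input) := by unfold Pre_find_followers; infer_instance
def pvWitness_find_followers : List (List String) := [["a", "b"], ["a"], ["c"]]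

def Spec_find_followers (input : List (List String)) (out : List (String × Int)) : Prop := out = find_followers_alt input
instance (input : List (List String)) (out : List (String × Int)) : Decidable (Spec_find_followers input out) := by unfold Spec_find_followers; infer_instance

-- ===== CLAIM (what is proved, stated in full; the proofs are below) =====
def Claim_equal_find_followers : Prop := ∀ (input : List (List String)), Dom_find_followers input → Pre_find_followers input → Spec_find_followers input (find_followers input)

-- ===== LEMMAS AND PROOFS =====

lemma pvStepA_keys (d : PySem.Dict String Int) (e : List String) :
    (pvStepA d e).keys = PySem.Set.add d.keys (pvHead e) := by
  by_cases hc : d.contains (pvHead e) = true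
  · have hm : pvHead e ∈ d.keys := (PySem.Dict.contains_iff_mem_keys d _).mp hc
    unfold pvStepA
    by_cases h1 : 1 < e.length
    · rw [if_pos h1, PySem.Dict.keys_modify, PySem.Dict.keys_insert_of_contains _ _ hc]
      simp [PySem.Set.add, hm]
    · rw [if_neg h1, if_pos hc]
      simp [PySem.Set.add, hm]
  · have hm : pvHead e ∉ d.keys := by
      intro h; exact hc ((PySem.Dict.contains_iff_mem_keys d _).mpr h)
    have hc' : d.contains (pvHead e) = false := by simpa using hc
    unfold pvStepA
    by_cases h1 : 1 < e.length
    · rw [if_pos h1, PySem.Dict.keys_modify, PySem.Dict.keys_insert_of_not_contains _ _ hc']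
      simp [PySem.Set.add, hm]
    · rw [if_neg h1, if_neg (by simp [hc']), PySem.Dict.keys_insert_of_not_contains _ _ hc']
      simp [PySem.Set.add, hm]

lemma pvStepA_nodup (d : PySem.Dict String Int) (e : List String) (h : d.keys.Nodup) :
    (pvStepA d e).keys.Nodup := by
  rw [pvStepA_keys]
  by_cases hm : pvHead e ∈ d.keys
  · simpa [PySem.Set.add, hm] using h
  · simp only [PySem.Set.add]
    rw [if_neg (by simpa using hm)]
    simp only [List.nodup_append, List.nodup_singleton, true_and]
    exact ⟨h, fun a ha b hb => by rw [List.mem_singleton] at hb; subst hb; rintro rfl; exact hm ha⟩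

lemma pvA_keys (l : List (List String)) (d : PySem.Dict String Int) (h : d.keys.Nodup) :
    (l.foldl pvStepA d).keys = PySem.Set.update d.keys (l.map pvHead)
      ∧ (l.foldl pvStepA d).keys.Nodup := by
  induction l generalizing d with
  | nil => exact ⟨rfl, h⟩
  | cons x l ih =>
    have := ih (pvStepA d x) (pvStepA_nodup d x h)
    simpa [PySem.Set.update, pvStepA_keys d x] using this

lemma pvStepA_getD (d : PySem.Dict String Int) (e : List String) (k : String) :
    (pvStepA d e).getD k 0 = d.getD k 0 + (if pvHead e = k ∧ 1 < e.length then 1 else 0) := by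
  unfold pvStepA
  by_cases h1 : 1 < e.length
  · rw [if_pos h1, PySem.Dict.getD_modify]
    by_cases hk : k = pvHead e
    · subst hk; simp [h1]
    · rw [if_neg hk, if_neg (by tauto)]; ring
  · rw [if_neg h1]
    by_cases hc : d.contains (pvHead e) = true
    · rw [if_pos hc, if_neg (by tauto)]; ring
    · rw [if_neg hc, if_neg (by tauto), PySem.Dict.getD_insert]
      by_cases hk : k = pvHead e
      · subst hk
        rw [if_pos rfl, PySem.Dict.getD_of_not_contains d 0 (by simpa using hc)]
        ring
      · rw [if_neg hk]; ring

lemma pvA_getD (l : List (List String)) (d : PySem.Dict String Int) (k : String) :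
    (l.foldl pvStepA d).getD k 0
      = d.getD k 0 + (l.countP (fun e => pvHead e == k && decide (1 < e.length)) : Int) := by
  induction l generalizing d with
  | nil => simp
  | cons x l ih =>
    rw [List.foldl_cons, ih, pvStepA_getD, List.countP_cons]
    by_cases hx : pvHead x = k ∧ 1 < x.length
    · rw [if_pos hx, if_pos (by simp [hx.1, hx.2])]
      push_cast; ring
    · rw [if_neg hx, if_neg (by simpa using hx)]
      push_cast; ring

lemma pvB_getD (v : String → Int) (l : List (List String)) (d : PySem.Dict String Int) (k : String) :
    (l.foldl (fun d e => d.insert (pvHead e) (v (pvHead e))) d).getD k 0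
      = if k ∈ l.map pvHead then v k else d.getD k 0 := by
  induction l generalizing d with
  | nil => simp
  | cons x l ih =>
    rw [List.foldl_cons, ih]
    by_cases hm : k ∈ l.map pvHead
    · simp [hm]
    · rw [if_neg hm, PySem.Dict.getD_insert]
      by_cases hk : k = pvHead x
      · subst hk; simp
      · rw [if_neg hk, if_neg (by simp [hk, hm])]

-- counts[k] = number of sublists of l with first element k and length > 1
lemma pvCounts_getD (l : List (List String)) (k : String) :
    (pvCounts l).getD k 0 = (l.countP (fun e => pvHead e == k && decide (1 < e.length)) : Int) := by
  unfold pvCounts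
  rw [PySem.Dict.getD_counter, List.count_eq_countP, List.countP_map, List.countP_filter]
  congr 1

-- ===== VERDICT (by name: the statement is the Claim_ definition above) =====
theorem find_followers_spec : Claim_equal_find_followers := by
  intro input _ _
  unfold Spec_find_followers find_followers find_followers_alt
  obtain ⟨hkA, hndA⟩ := pvA_keys input PySem.Dict.empty (by simp)
  have hkB := PySem.Dict.keys_foldl_insert_key input pvHead
    (fun d e => (pvCounts input).getD (pvHead e) 0) (PySem.Dict.empty : PySem.Dict String Int)
  have hndB := PySem.Dict.nodup_keys_foldl_insert_key input pvHead
    (fun d e => (pvCounts input).getD (pvHead e) 0) (PySem.Dict.empty : PySem.Dict String Int) (by simp)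
  rw [PySem.Dict.items_eq_map_keys _ hndA 0, PySem.Dict.items_eq_map_keys _ hndB 0, hkA, hkB]
  simp only [PySem.Dict.keys_empty]
  apply List.map_congr_left
  intro k hk
  have hmem : k ∈ input.map pvHead := by
    have : k ∈ PySem.Set.ofList (input.map pvHead) := by
      simpa [PySem.Set.ofList_eq_foldl, PySem.Set.update] using hk
    exact (PySem.Set.mem_ofList _ _).mp this
  rw [pvA_getD, pvB_getD (fun s => (pvCounts input).getD s 0), if_pos hmem, pvCounts_getD]
  simp
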